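-- pv_equiv track=rewrite | github.com/vrushank-agrawal/Polytechnique_Courses | CSE101/Tutorial_12/recursion.py | read_positive_integer
-- ===== SOURCE A (Python) =====
-- def read_positive_integer(text, position):
--     """Read a number starting from the given position, return it and the first
--     position after it in a tuple. If there is no number at the given position
--     then return None.
--     """
--     new_text=''
--     if text[position] not in '0123456789':
--         return None
--     for i in range(position, len(text)):
--         if text[i] in '0123456789':
--             new_text+=text[i]
--             position+=1
--         if text[i] not in '0123456789':
--             break
--     return (int(new_text), position)
-- ===== SOURCE B (Python) =====
-- def read_positive_integer(text, position):
--     """Read a number starting from the given position, return it and the first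
--     position after it in a tuple. If there is no number at the given position
--     then return None.
--     """
--     if text[position] not in '0123456789':
--         return None
--     end = position
--     while end < len(text) and text[end] in '0123456789':
--         end += 1
--     return (int(text[position:end]), end)
-- ===== Notes on version B (the rewrite author's own statement) =====
-- stated objective: simpler
-- what changed: B separates boundary-finding from conversion: one while loop locates the end of the digit run, then a single int() on the slice text[position:end] replaces A's interleaved char-by-char string accumulation and position bookkeeping.
-- outside the precondition, e.g. on read_positive_integer('12', -1): A returns (212, 2), B returns (2, 2); on read_positive_integer('a1', -1): A returns (1, 0), B raises ValueError
import Mathlib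
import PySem

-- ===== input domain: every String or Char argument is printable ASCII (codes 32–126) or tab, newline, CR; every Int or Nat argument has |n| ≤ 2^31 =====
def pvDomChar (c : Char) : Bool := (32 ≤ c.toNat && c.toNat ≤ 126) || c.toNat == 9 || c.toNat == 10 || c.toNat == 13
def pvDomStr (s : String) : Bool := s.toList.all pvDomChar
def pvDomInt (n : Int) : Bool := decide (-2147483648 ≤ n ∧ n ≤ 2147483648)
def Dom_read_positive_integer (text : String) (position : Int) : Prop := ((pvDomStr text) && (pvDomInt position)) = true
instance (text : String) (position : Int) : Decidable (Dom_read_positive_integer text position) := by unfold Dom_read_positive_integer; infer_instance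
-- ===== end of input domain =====

-- B separates boundary-finding from conversion (simpler): a single scan finds the end of the
-- digit run, then one int() on the slice; A interleaves char-by-char accumulation.

-- shared port of Python's `c in '0123456789'` (single-char membership)
def pvIsDigit (c : Char) : Bool := ['0','1','2','3','4','5','6','7','8','9'].contains c

-- ===== PORT A =====
-- the `for i in range(position, len(text))` loop with its two ifs and `break`
def pvLoopA (cs : List Char) : List Int → List Char → Int → List Char × Int
  | [], nt, pos => (nt, pos)
  | i :: rest, nt, pos =>
    match PySem.List.pyGet? cs i with
    | none => (nt, pos)   -- IndexError: unreachable, i ranges over valid indices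
    | some c =>
      let nt' := if pvIsDigit c then nt ++ [c] else nt
      let pos' := if pvIsDigit c then pos + 1 else pos
      if !pvIsDigit c then (nt', pos') else pvLoopA cs rest nt' pos'

def read_positive_integer (text : String) (position : Int) : Option (Int × Int) :=
  let cs := text.toList
  match PySem.List.pyGet? cs position with
  | none => none   -- IndexError (excluded by Pre_)
  | some c =>
    if !pvIsDigit c then none
    else
      let r := pvLoopA cs (PySem.List.pyRange position (cs.length : Int) 1) [] position
      match PySem.Int.ofChars? r.1 with
      | none => none   -- int('') ValueError: unreachable under Pre_
      | some v => some (v, r.2)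

-- ===== PORT B =====
-- the `while end < len(text) and text[end] in '0123456789': end += 1` loop (fuel = len - end)
def pvRunEnd (cs : List Char) : Nat → Int → Int
  | 0, e => e
  | f+1, e =>
    if decide (e < (cs.length : Int)) && (PySem.List.pyGet? cs e).any pvIsDigit then
      pvRunEnd cs f (e + 1)
    else e

def read_positive_integer_alt (text : String) (position : Int) : Option (Int × Int) :=
  let cs := text.toList
  match PySem.List.pyGet? cs position with
  | none => none   -- IndexError (excluded by Pre_)
  | some c =>
    if !pvIsDigit c then none
    else
      let e := pvRunEnd cs ((cs.length : Int) - position).toNat position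
      match PySem.Int.ofChars? (PySem.List.slice cs (some position) (some e)) with
      | none => none   -- int('') ValueError (excluded by Pre_)
      | some v => some (v, e)

-- ===== PRECONDITION & SPEC =====
-- Pre_ excludes out-of-range positions, on which A raises IndexError, and negative in-range
-- positions that point at a digit: there A's scan re-reads earlier characters through Python's
-- negative-index wraparound (an accident of indexing, e.g. ("12",-1) gives (212,2)) and B
-- returns a different value or raises ValueError on an empty slice.
def Pre_read_positive_integer (text : String) (position : Int) : Prop :=
  -(text.toList.length : Int) ≤ position ∧ position < (text.toList.length : Int) ∧
  (0 ≤ position ∨ (PySem.List.pyGet? text.toList position).all (fun c => !pvIsDigit c) = true)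
instance (text : String) (position : Int) : Decidable (Pre_read_positive_integer text position) := by
  unfold Pre_read_positive_integer; infer_instance

def pvWitness_read_positive_integer : String × Int := ("a12b", 1)

def Spec_read_positive_integer (text : String) (position : Int) (out : Option (Int × Int)) : Prop := out = read_positive_integer_alt text position
instance (text : String) (position : Int) (out : Option (Int × Int)) : Decidable (Spec_read_positive_integer text position out) := by unfold Spec_read_positive_integer; infer_instance

-- ===== CLAIM (what is proved, stated in full; the proofs are below) =====
def Claim_equal_read_positive_integer : Prop := ∀ (text : String) (position : Int), Dom_read_positive_integer text position → Pre_read_positive_integer text position → Spec_read_positive_integer text position (read_positive_integer text position)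

-- ===== LEMMAS AND PROOFS =====

-- A's loop appends exactly the digit run starting at p and advances position by its length
lemma pvLoopA_eq (cs : List Char) :
    ∀ (n p : Nat) (acc : List Char) (pos : Int), p + n = cs.length →
    pvLoopA cs (PySem.List.pyRange (p : Int) (cs.length : Int) 1) acc pos
      = (acc ++ (cs.drop p).takeWhile pvIsDigit,
         pos + ((cs.drop p).takeWhile pvIsDigit).length) := by
  intro n
  induction n with
  | zero =>
    intro p acc pos hp
    have hlen : (cs.length : Int) ≤ (p : Int) := by omega
    rw [PySem.List.pyRange_one_eq_nil hlen]
    have : cs.drop p = [] := List.drop_eq_nil_of_le (by omega)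
    simp [pvLoopA, this]
  | succ n ih =>
    intro p acc pos hp
    have hplt : p < cs.length := by omega
    have hcons : PySem.List.pyRange (p : Int) (cs.length : Int) 1
        = (p : Int) :: PySem.List.pyRange ((p : Int) + 1) (cs.length : Int) 1 :=
      PySem.List.pyRange_one_cons (by exact_mod_cast hplt)
    have hget : PySem.List.pyGet? cs (p : Int) = some cs[p] := by
      simp [PySem.List.pyGet?_natCast, List.getElem?_eq_getElem hplt]
    have hdrop : cs.drop p = cs[p] :: cs.drop (p + 1) := List.drop_eq_getElem_cons hplt
    rw [hcons]
    by_cases hd : pvIsDigit cs[p]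
    · have hcast : (p : Int) + 1 = ((p + 1 : Nat) : Int) := by push_cast; ring
      simp only [pvLoopA, hget, hd, if_true, Bool.not_true, Bool.false_eq_true, if_false, hcast]
      rw [ih (p + 1) (acc ++ [cs[p]]) (pos + 1) (by omega), hdrop,
          List.takeWhile_cons_of_pos hd]
      simp only [Prod.mk.injEq, List.length_cons, List.append_assoc, List.singleton_append]
      exact ⟨trivial, by push_cast; ring⟩
    · simp only [pvLoopA, hget, hd, Bool.not_false, if_true]
      rw [hdrop, List.takeWhile_cons_of_neg (by simp [hd])]
      simp

-- B's loop stops exactly at the end of the digit run starting at p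
lemma pvRunEnd_eq (cs : List Char) :
    ∀ (n p : Nat), p + n = cs.length →
    pvRunEnd cs n (p : Int) = (p : Int) + ((cs.drop p).takeWhile pvIsDigit).length := by
  intro n
  induction n with
  | zero =>
    intro p hp
    have : cs.drop p = [] := List.drop_eq_nil_of_le (by omega)
    simp [pvRunEnd, this]
  | succ n ih =>
    intro p hp
    have hplt : p < cs.length := by omega
    have hget : PySem.List.pyGet? cs (p : Int) = some cs[p] := by
      simp [PySem.List.pyGet?_natCast, List.getElem?_eq_getElem hplt]
    have hdrop : cs.drop p = cs[p] :: cs.drop (p + 1) := List.drop_eq_getElem_cons hplt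
    by_cases hd : pvIsDigit cs[p]
    · have hlt : ((p : Int) < (cs.length : Int)) := by exact_mod_cast hplt
      have hcast : (p : Int) + 1 = ((p + 1 : Nat) : Int) := by push_cast; ring
      simp only [pvRunEnd, hget, Option.any_some, hd, decide_eq_true hlt, Bool.and_true,
        if_true, hcast]
      rw [ih (p + 1) (by omega), hdrop, List.takeWhile_cons_of_pos hd]
      simp only [List.length_cons]
      push_cast; ring
    · simp only [pvRunEnd, hget, Option.any_some, hd, Bool.and_false, Bool.false_eq_true,
        if_false]
      rw [hdrop, List.takeWhile_cons_of_neg (by simp [hd])]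
      simp

-- the slice text[p:end] IS the digit run
lemma pvSlice_eq (cs : List Char) (p : Nat) :
    PySem.List.slice cs (some (p : Int))
        (some ((p : Int) + (((cs.drop p).takeWhile pvIsDigit).length : Int)))
      = (cs.drop p).takeWhile pvIsDigit := by
  rw [PySem.List.slice_natCast_add]
  exact (List.prefix_iff_eq_take.mp (List.takeWhile_prefix pvIsDigit)).symm

theorem read_positive_integer_spec_aux :
    ∀ (text : String) (position : Int), Pre_read_positive_integer text position →
    read_positive_integer text position = read_positive_integer_alt text position := by
  intro text position hpre
  obtain ⟨h1, h2, h3⟩ := hpre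
  by_cases hpos : 0 ≤ position
  · -- nonnegative position: the interesting case
    set cs := text.toList with hcs
    obtain ⟨p, rfl⟩ : ∃ p : Nat, position = (p : Int) := ⟨position.toNat, by omega⟩
    have hplt : p < cs.length := by exact_mod_cast h2
    have hget : PySem.List.pyGet? cs (p : Int) = some cs[p] := by
      simp [PySem.List.pyGet?_natCast, List.getElem?_eq_getElem hplt]
    by_cases hd : pvIsDigit cs[p]
    · have hn : p + (cs.length - p) = cs.length := by omega
      have hfuel : (((cs.length : Int) - (p : Int)).toNat) = cs.length - p := by omega
      simp only [read_positive_integer, read_positive_integer_alt, ← hcs, hget, hd,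
        Bool.not_true, Bool.false_eq_true, if_false, hfuel]
      rw [pvLoopA_eq cs (cs.length - p) p [] (p : Int) hn,
          pvRunEnd_eq cs (cs.length - p) p hn, pvSlice_eq]
      simp
    · simp [read_positive_integer, read_positive_integer_alt, ← hcs, hget, hd]
  · -- negative in-range position: guard character is not a digit, both return none
    have hinr : ¬ PySem.List.pyGet? text.toList position = none := by
      rw [PySem.List.pyGet?_eq_none_iff]
      simp only [PySem.Raise.InRange, not_not]
      omega
    obtain ⟨c, hc⟩ := Option.ne_none_iff_exists'.mp hinr
    have hd : pvIsDigit c = false := by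
      rcases h3 with h | h
      · omega
      · rw [hc] at h; simpa using h
    simp [read_positive_integer, read_positive_integer_alt, hc, hd]

-- ===== VERDICT (by name: the statement is the Claim_ definition above) =====
theorem read_positive_integer_spec : Claim_equal_read_positive_integer := by
  intro text position _ hpre
  exact read_positive_integer_spec_aux text position hpre
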